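-- pv_equiv track=rewrite | github.com/0x99E/helping_hand | bot/handler.py | filter_str
-- ===== SOURCE A (Python) =====
-- import string
--
-- def filter_str(raw_string):
--     ready_string = ""
--     try:
--         allowed_chars = string.ascii_letters + string.digits + " "
--         for char in raw_string:
--             if char in allowed_chars:
--                 ready_string += char
--     except:
--         pass
--     return ready_string
-- ===== SOURCE B (Python) =====
-- import string
--
-- def filter_str(raw_string):
--     try:
--         allowed = set(string.ascii_letters + string.digits + " ")
--         bad = set(raw_string) - allowed
--         return raw_string.translate({ord(c): None for c in bad})
--     except:
--         return ""
-- ===== Notes on version B (the rewrite author's own statement) =====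
-- stated objective: faster
-- what changed: Instead of scanning a 63-char allowed string per character and accumulating with +=, B computes the set of distinct characters of the input, subtracts the allowed set, and deletes those characters in one str.translate call with a deletion table.
import Mathlib
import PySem

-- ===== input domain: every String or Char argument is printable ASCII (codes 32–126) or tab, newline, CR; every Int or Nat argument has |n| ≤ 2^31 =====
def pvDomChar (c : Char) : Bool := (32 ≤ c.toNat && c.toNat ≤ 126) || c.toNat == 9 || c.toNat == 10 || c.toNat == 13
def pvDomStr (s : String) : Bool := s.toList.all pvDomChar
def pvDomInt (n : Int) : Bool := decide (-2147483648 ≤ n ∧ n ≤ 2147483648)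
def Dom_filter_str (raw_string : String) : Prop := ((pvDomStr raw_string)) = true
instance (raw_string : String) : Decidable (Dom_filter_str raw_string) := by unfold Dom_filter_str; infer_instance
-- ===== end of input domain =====

-- B replaces A's per-character membership loop with a staged set-difference:
-- the distinct characters of the string minus the allowed set give a deletion
-- table applied via str.translate (measured faster at large sizes; return value only).

-- ===== PORT A =====
-- string.ascii_letters + string.digits + " "
def pvAllowedChars : List Char :=
  "abcdefghijklmnopqrstuvwxyzABCDEFGHIJKLMNOPQRSTUVWXYZ0123456789 ".toList

def filter_str (raw_string : String) : String :=
  String.mk (raw_string.toList.foldl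
    (fun ready_string char =>
      if pvAllowedChars.contains char then ready_string ++ [char] else ready_string)
    [])

-- ===== PORT B =====
-- allowed = set(string.ascii_letters + string.digits + " ")
def pvAllowedSet : PySem.Set Char := PySem.Set.ofList pvAllowedChars

-- bad = set(raw_string) - allowed; deletion table {ord(c): None for c in bad};
-- raw_string.translate(table) keeps the chars whose code is not a key of the table.
def filter_str_alt (raw_string : String) : String :=
  let bad : PySem.Set Char :=
    PySem.Set.diff (PySem.Set.ofList raw_string.toList) pvAllowedSet
  let table : PySem.Dict Nat Unit :=
    bad.foldl (fun d c => d.insert c.toNat ()) PySem.Dict.empty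
  String.mk (raw_string.toList.filter (fun c => !(table.contains c.toNat)))

-- ===== PRECONDITION & SPEC =====
def Spec_filter_str (raw_string : String) (out : String) : Prop := out = filter_str_alt raw_string
instance (raw_string : String) (out : String) : Decidable (Spec_filter_str raw_string out) := by unfold Spec_filter_str; infer_instance

-- ===== CLAIM (what is proved, stated in full; the proofs are below) =====
def Claim_equal_filter_str : Prop := ∀ (raw_string : String), Dom_filter_str raw_string → Spec_filter_str raw_string (filter_str raw_string)

-- ===== LEMMAS AND PROOFS =====
lemma pvChar_toNat_inj {a b : Char} (h : a.toNat = b.toNat) : a = b := by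
  rw [← Char.ofNat_toNat a, ← Char.ofNat_toNat b, h]

lemma pvTable_contains (bad : List Char) (c : Char) :
    (bad.foldl (fun d x => d.insert x.toNat ()) PySem.Dict.empty).contains c.toNat
      = bad.contains c := by
  rw [PySem.Dict.contains_eq_decide_mem_keys,
      PySem.Dict.keys_foldl_insert_key (key := Char.toNat)]
  simp only [PySem.Dict.keys_empty, List.contains_eq_mem]
  congr 1
  simp only [eq_iff_iff, PySem.Set.mem_update, List.mem_map, List.not_mem_nil, false_or]
  constructor
  · rintro ⟨x, hx, hxc⟩; exact (pvChar_toNat_inj hxc) ▸ hx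
  · intro h; exact ⟨c, h, rfl⟩

-- ===== VERDICT (by name: the statement is the Claim_ definition above) =====
theorem filter_str_spec : Claim_equal_filter_str := by
  intro s _
  unfold Spec_filter_str filter_str filter_str_alt
  rw [PySem.List.foldl_append_if_eq_filter]
  congr 1
  apply List.filter_congr
  intro c hc
  rw [pvTable_contains]
  have hmem : (PySem.Set.diff (PySem.Set.ofList s.toList) pvAllowedSet).contains c
      = !(pvAllowedChars.contains c) := by
    simp only [PySem.Set.contains_eq_listContains]
    by_cases h : c ∈ pvAllowedChars
    · simp [PySem.Set.mem_diff, PySem.Set.mem_ofList, pvAllowedSet, h]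
    · simp [PySem.Set.mem_diff, PySem.Set.mem_ofList, pvAllowedSet, h, hc]
  simp only [PySem.Set.contains_eq_listContains] at hmem
  rw [hmem, Bool.not_not]
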